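-- pv_equiv track=rewrite | github.com/InagoesIT/Vivdici_Ina_3B4_Python | lab5/6.py | get_even_odd_pairs
-- ===== SOURCE A (Python) =====
-- def get_even_odd_pairs(numbers):
--     odd_numbers = []
--     even_numbers = []
--
--     for number in numbers:
--         if number % 2 == 0:
--             even_numbers.append(number)
--         else:
--             odd_numbers.append(number)
--
--     return list(zip(even_numbers, odd_numbers))
-- ===== SOURCE B (Python) =====
-- def get_even_odd_pairs(numbers):
--     pending_evens = []
--     pending_odds = []
--     pairs = []
--     for number in numbers:
--         if number % 2 == 0:
--             pending_evens.append(number)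
--         else:
--             pending_odds.append(number)
--         if pending_evens and pending_odds:
--             pairs.append((pending_evens.pop(0), pending_odds.pop(0)))
--     return pairs
-- ===== Notes on version B (the rewrite author's own statement) =====
-- stated objective: alternative
-- what changed: Instead of partitioning into two full lists and zipping afterwards, B does a single pass keeping two pending FIFO queues and emits each (even, odd) pair online as soon as both queues are non-empty, so no post-hoc zip is needed.
import Mathlib
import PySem

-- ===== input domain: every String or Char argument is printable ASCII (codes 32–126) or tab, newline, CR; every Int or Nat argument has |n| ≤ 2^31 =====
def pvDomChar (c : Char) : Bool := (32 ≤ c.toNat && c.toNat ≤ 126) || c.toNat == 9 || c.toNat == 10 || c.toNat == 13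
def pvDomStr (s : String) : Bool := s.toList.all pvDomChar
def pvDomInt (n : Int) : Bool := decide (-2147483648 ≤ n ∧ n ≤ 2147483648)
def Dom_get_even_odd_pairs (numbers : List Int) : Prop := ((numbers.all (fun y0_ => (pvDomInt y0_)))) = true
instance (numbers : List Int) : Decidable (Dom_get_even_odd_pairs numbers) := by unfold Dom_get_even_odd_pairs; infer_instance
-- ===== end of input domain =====

-- B replaces partition-then-zip by a single pass with two pending FIFO queues that
-- emits each (even, odd) pair as soon as both queues are non-empty (objective: alternative).

-- shared parity test: Python's 'number % 2 == 0'
def pvEven (n : Int) : Bool := PySem.Int.mod n 2 == 0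

-- ===== PORT A =====
-- state = (odd_numbers, even_numbers), in Python's declaration order
def pvStepA (st : List Int × List Int) (number : Int) : List Int × List Int :=
  if pvEven number then (st.1, st.2 ++ [number])
  else (st.1 ++ [number], st.2)

def get_even_odd_pairs (numbers : List Int) : List (Int × Int) :=
  let st := numbers.foldl pvStepA ([], [])
  List.zip st.2 st.1

-- ===== PORT B =====
-- state = (pending_evens, pending_odds, pairs); append to the parity queue, then
-- pop the front of each queue into pairs when both are non-empty
def pvStepB (st : List Int × List Int × List (Int × Int)) (number : Int) :
    List Int × List Int × List (Int × Int) :=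
  let st' := if pvEven number then (st.1 ++ [number], st.2.1, st.2.2)
             else (st.1, st.2.1 ++ [number], st.2.2)
  match st' with
  | (e :: es, o :: os, ps) => (es, os, ps ++ [(e, o)])
  | s => s

def get_even_odd_pairs_alt (numbers : List Int) : List (Int × Int) :=
  (numbers.foldl pvStepB ([], [], [])).2.2

-- ===== PRECONDITION & SPEC =====
def Spec_get_even_odd_pairs (numbers : List Int) (out : List (Int × Int)) : Prop := out = get_even_odd_pairs_alt numbers
instance (numbers : List Int) (out : List (Int × Int)) : Decidable (Spec_get_even_odd_pairs numbers out) := by unfold Spec_get_even_odd_pairs; infer_instance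

-- ===== CLAIM (what is proved, stated in full; the proofs are below) =====
def Claim_equal_get_even_odd_pairs : Prop := ∀ (numbers : List Int), Dom_get_even_odd_pairs numbers → Spec_get_even_odd_pairs numbers (get_even_odd_pairs numbers)

-- ===== LEMMAS AND PROOFS =====

-- A's loop partitions: final state = (odds so far ++ odd filter, evens so far ++ even filter)
lemma foldA_eq (xs : List Int) : ∀ (os es : List Int),
    xs.foldl pvStepA (os, es) =
      (os ++ xs.filter (fun n => !pvEven n), es ++ xs.filter pvEven) := by
  induction xs with
  | nil => simp
  | cons n t ih =>
    intro os es
    cases hn : pvEven n <;>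
      simp [pvStepA, List.filter_cons, hn, ih]

-- one step of B at each reachable queue shape (one queue is always empty)
lemma stepB_even_pop (n o : Int) (os : List Int) (res : List (Int × Int))
    (hn : pvEven n = true) : pvStepB ([], o :: os, res) n = ([], os, res ++ [(n, o)]) := by
  simp only [pvStepB, hn, if_true, List.nil_append]

lemma stepB_even_wait (n : Int) (qe : List Int) (res : List (Int × Int))
    (hn : pvEven n = true) : pvStepB (qe, [], res) n = (qe ++ [n], [], res) := by
  simp only [pvStepB, hn, if_true]; cases qe <;> rfl

lemma stepB_odd_pop (n e : Int) (es : List Int) (res : List (Int × Int))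
    (hn : pvEven n = false) : pvStepB (e :: es, [], res) n = (es, [], res ++ [(e, n)]) := by
  simp only [pvStepB, hn, Bool.false_eq_true, if_false, List.nil_append]

lemma stepB_odd_wait (n : Int) (qo : List Int) (res : List (Int × Int))
    (hn : pvEven n = false) : pvStepB ([], qo, res) n = ([], qo ++ [n], res) := by
  simp only [pvStepB, hn, Bool.false_eq_true, if_false]

-- B's loop invariant: emitted pairs ++ zip of the remaining queues+filters
lemma foldB_eq (xs : List Int) : ∀ (qe qo : List Int) (res : List (Int × Int)),
    (qe = [] ∨ qo = []) →
    (xs.foldl pvStepB (qe, qo, res)).2.2 =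
      res ++ List.zip (qe ++ xs.filter pvEven) (qo ++ xs.filter (fun n => !pvEven n)) := by
  induction xs with
  | nil =>
    intro qe qo res h
    rcases h with h | h <;> simp [h]
  | cons n t ih =>
    intro qe qo res h
    cases hn : pvEven n
    · -- n odd
      rcases h with hqe | hqo
      · subst hqe
        rw [List.foldl_cons, stepB_odd_wait n qo res hn,
          ih [] (qo ++ [n]) res (Or.inl rfl)]
        simp [List.filter_cons, hn]
      · subst hqo
        cases qe with
        | nil =>
          rw [List.foldl_cons, stepB_odd_wait n [] res hn,
            ih [] ([] ++ [n]) res (Or.inl rfl)]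
          simp [List.filter_cons, hn]
        | cons e es =>
          rw [List.foldl_cons, stepB_odd_pop n e es res hn,
            ih es [] (res ++ [(e, n)]) (Or.inr rfl)]
          simp [List.filter_cons, hn]
    · -- n even
      rcases h with hqe | hqo
      · subst hqe
        cases qo with
        | nil =>
          rw [List.foldl_cons, stepB_even_wait n [] res hn,
            ih ([] ++ [n]) [] res (Or.inr rfl)]
          simp [List.filter_cons, hn]
        | cons o os =>
          rw [List.foldl_cons, stepB_even_pop n o os res hn,
            ih [] os (res ++ [(n, o)]) (Or.inl rfl)]
          simp [List.filter_cons, hn]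
      · subst hqo
        rw [List.foldl_cons, stepB_even_wait n qe res hn,
          ih (qe ++ [n]) [] res (Or.inr rfl)]
        simp [List.filter_cons, hn]

-- ===== VERDICT (by name: the statement is the Claim_ definition above) =====
theorem get_even_odd_pairs_spec : Claim_equal_get_even_odd_pairs := by
  intro numbers _
  unfold Spec_get_even_odd_pairs get_even_odd_pairs get_even_odd_pairs_alt
  rw [foldA_eq numbers [] [], foldB_eq numbers [] [] [] (Or.inl rfl)]
  simp
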